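-- pv_equiv track=rewrite | github.com/raphajacobson/CS-2 | Rapha_Jacobson_what_is_in_a_name.py | convert_lower
-- ===== SOURCE A (Python) =====
-- def convert_lower(user_name):                                                                                   #define convert_lower as a function with user_name as an argument
--     '''
--     converts user's entire name to lowercase
--     Args:
--         user_name (string): any given word
--     Returns:
--         the user's name in all lowercase
--     '''
--     output = ""                                                                                                 #define the variable "output" as an empty string
--     for char in user_name:                                                                                      #for loop (for every character in the user's name)
--         num = ord(char)                                                                                         #create variable "num" defined as the ordinal variable for every character in the user's name
--         if num >= 65 and num <= 90:                                                                             #if the ordinal value is greater than 65 and less than 90 (if the number is uppercase)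
--             converted_num = ord(char) + 32                                                                      #create variable "converted_num" and define it as the ordinal value of the character + 32 (newly defines the number as its lowercase counterpart)
--             output = output + chr(converted_num)                                                                #convert the character's new ordinal value back into its character and add it to "output"
--         else:                                                                                                   #otherwise (if the character is already lowercase)
--             output = output + char                                                                              #add the character straight to the output
--     return output                                                                                               #return the output (the user's name in all lowercase)
-- ===== SOURCE B (Python) =====
-- def convert_lower(user_name):
--     table = {i: i + 32 for i in range(65, 91)}
--     return user_name.translate(table)
-- ===== Notes on version B (the rewrite author's own statement) =====
-- stated objective: idiomatic
-- what changed: Replaces the per-character conditional ord/chr arithmetic loop with a precomputed ASCII uppercase-to-lowercase translation table applied in one str.translate pass.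
import Mathlib
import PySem

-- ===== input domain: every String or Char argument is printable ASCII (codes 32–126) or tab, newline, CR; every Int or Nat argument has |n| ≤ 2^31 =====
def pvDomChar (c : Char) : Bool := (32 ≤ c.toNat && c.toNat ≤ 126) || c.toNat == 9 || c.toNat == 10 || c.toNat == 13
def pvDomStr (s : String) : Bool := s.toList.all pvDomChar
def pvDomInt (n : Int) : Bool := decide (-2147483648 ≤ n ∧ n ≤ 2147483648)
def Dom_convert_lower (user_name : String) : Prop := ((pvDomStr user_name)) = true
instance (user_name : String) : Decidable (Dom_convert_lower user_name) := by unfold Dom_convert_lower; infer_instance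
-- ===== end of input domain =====

-- B replaces A's per-character conditional ord/chr arithmetic with a precomputed
-- ASCII uppercase→lowercase translation table applied in one table-driven pass (idiomatic).

-- ===== PORT A =====
-- character-by-character loop: ord / chr ported by hand via Char.toNat / Char.ofNat (exact on all admitted chars)
def convert_lower (user_name : String) : String :=
  String.mk (user_name.toList.foldl (fun output char =>
    let num : Int := char.toNat
    if num ≥ 65 ∧ num ≤ 90 then
      let converted_num : Int := (char.toNat : Int) + 32
      output ++ [Char.ofNat converted_num.toNat]
    else
      output ++ [char]) [])

-- ===== PORT B =====
-- the dict comprehension {i: i + 32 for i in range(65, 91)}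
def pvTable : PySem.Dict Int Int :=
  (PySem.List.pyRange 65 91 1).foldl (fun d i => d.insert i (i + 32)) PySem.Dict.empty

-- str.translate with an int→int table: each char is looked up by ordinal, mapped if present
def convert_lower_alt (user_name : String) : String :=
  String.mk (user_name.toList.map (fun c =>
    match pvTable.get? (c.toNat : Int) with
    | some v => Char.ofNat v.toNat
    | none => c))

-- ===== PRECONDITION & SPEC =====
def Spec_convert_lower (user_name : String) (out : String) : Prop := out = convert_lower_alt user_name
instance (user_name : String) (out : String) : Decidable (Spec_convert_lower user_name out) := by unfold Spec_convert_lower; infer_instance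

-- ===== CLAIM (what is proved, stated in full; the proofs are below) =====
def Claim_equal_convert_lower : Prop := ∀ (user_name : String), Dom_convert_lower user_name → Spec_convert_lower user_name (convert_lower user_name)

-- ===== LEMMAS AND PROOFS =====

-- keys absent from a literal dict look up to none
theorem pvGetNone (l : List (Int × Int)) (k : Int) (h : ∀ p ∈ l, p.1 ≠ k) :
    (PySem.Dict.mk l).get? k = none := by
  induction l with
  | nil => rfl
  | cons p t ih =>
    rw [PySem.Dict.get?_mk_cons]
    rw [if_neg (by simp [h p List.mem_cons_self])]
    exact ih (fun q hq => h q (List.mem_cons_of_mem _ hq))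

-- the translation table looks up exactly the uppercase ASCII ordinals
set_option maxHeartbeats 1000000 in
theorem pvTable_get (k : Int) :
    pvTable.get? k = if 65 ≤ k ∧ k ≤ 90 then some (k + 32) else none := by
  have htable : pvTable = PySem.Dict.mk
      [(65, 97), (66, 98), (67, 99), (68, 100), (69, 101), (70, 102), (71, 103),
       (72, 104), (73, 105), (74, 106), (75, 107), (76, 108), (77, 109), (78, 110),
       (79, 111), (80, 112), (81, 113), (82, 114), (83, 115), (84, 116), (85, 117),
       (86, 118), (87, 119), (88, 120), (89, 121), (90, 122)] := by rfl
  by_cases h : 65 ≤ k ∧ k ≤ 90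
  · rw [htable, if_pos h]
    obtain ⟨h1, h2⟩ := h
    interval_cases k <;> decide
  · rw [htable, if_neg h]
    apply pvGetNone
    intro p hp
    fin_cases hp <;> (simp only [ne_eq]; omega)

-- the two per-character transformations agree on every character
theorem pvChar_step (c : Char) :
    (match pvTable.get? (c.toNat : Int) with
     | some v => Char.ofNat v.toNat
     | none => c) =
    (if ((c.toNat : Int) ≥ 65 ∧ (c.toNat : Int) ≤ 90) then
      Char.ofNat (((c.toNat : Int) + 32)).toNat
    else c) := by
  rw [pvTable_get]
  by_cases h : 65 ≤ (c.toNat : Int) ∧ (c.toNat : Int) ≤ 90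
  · rw [if_pos h, if_pos ⟨h.1, h.2⟩]
  · rw [if_neg h, if_neg (fun hh => h ⟨hh.1, hh.2⟩)]

-- A's append-accumulating fold, branch shape included, is the map of the per-character step
theorem pvFoldl_if_map (P : Char → Prop) [DecidablePred P] (f : Char → Char)
    (l acc : List Char) :
    l.foldl (fun output c => if P c then output ++ [f c] else output ++ [c]) acc
      = acc ++ l.map (fun c => if P c then f c else c) := by
  induction l generalizing acc with
  | nil => simp
  | cons x xs ih => by_cases h : P x <;> simp [List.foldl, h, ih]

-- ===== VERDICT (by name: the statement is the Claim_ definition above) =====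
theorem convert_lower_spec : Claim_equal_convert_lower := by
  intro user_name _
  show convert_lower user_name = convert_lower_alt user_name
  show String.mk (user_name.toList.foldl (fun output char =>
      if ((char.toNat : Int) ≥ 65 ∧ (char.toNat : Int) ≤ 90) then
        output ++ [Char.ofNat (((char.toNat : Int) + 32)).toNat]
      else output ++ [char]) []) = _
  rw [pvFoldl_if_map (fun char => ((char.toNat : Int) ≥ 65 ∧ (char.toNat : Int) ≤ 90))
      (fun char => Char.ofNat (((char.toNat : Int) + 32)).toNat), List.nil_append]
  unfold convert_lower_alt
  congr 1
  apply List.map_congr_left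
  intro c _
  exact (pvChar_step c).symm
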